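-- pv_equiv track=rewrite | github.com/ngiengkianyew/daily-coding-problem | solutions/problem_220.py | get_max_possible
-- ===== SOURCE A (Python) =====
-- def get_max_possible(coins, amount=0, turn=True):
--     if not coins:
--         return amount
--
--     if turn:
--         alt_1 = get_max_possible(coins[1:], amount + coins[0], False)
--         alt_2 = get_max_possible(coins[:-1], amount + coins[-1], False)
--         return max(alt_1, alt_2)
--
--     first, last = coins[0], coins[-1]
--     if first > last:
--         coins = coins[1:]
--     else:
--         coins = coins[:-1]
--
--     return get_max_possible(coins, amount, True)
-- ===== SOURCE B (Python) =====
-- def get_max_possible(coins, amount=0, turn=True):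
--     memo = {}
--
--     def best(i, j):
--         # our move on coins[i:j] (j exclusive)
--         if j <= i:
--             return 0
--         if (i, j) not in memo:
--             memo[(i, j)] = max(coins[i] + after(i + 1, j),
--                                coins[j - 1] + after(i, j - 1))
--         return memo[(i, j)]
--
--     def after(i, j):
--         # greedy opponent removes one end of coins[i:j], then our move
--         if j <= i:
--             return 0
--         if coins[i] > coins[j - 1]:
--             return best(i + 1, j)
--         return best(i, j - 1)
--
--     n = len(coins)
--     return amount + (best(0, n) if turn else after(0, n))
-- ===== Notes on version B (the rewrite author's own statement) =====
-- stated objective: faster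
-- what changed: A recurses on whole sublists (branching twice per our move, exponential); B does memoized interval recursion over endpoint pairs (i,j) of the fixed list, caching each our-turn subgame value once. Intended as asymptotically faster (O(n^2) vs exponential); measured 1.95x at n=16, and A timed out at n=64 where B returned.
import Mathlib
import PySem

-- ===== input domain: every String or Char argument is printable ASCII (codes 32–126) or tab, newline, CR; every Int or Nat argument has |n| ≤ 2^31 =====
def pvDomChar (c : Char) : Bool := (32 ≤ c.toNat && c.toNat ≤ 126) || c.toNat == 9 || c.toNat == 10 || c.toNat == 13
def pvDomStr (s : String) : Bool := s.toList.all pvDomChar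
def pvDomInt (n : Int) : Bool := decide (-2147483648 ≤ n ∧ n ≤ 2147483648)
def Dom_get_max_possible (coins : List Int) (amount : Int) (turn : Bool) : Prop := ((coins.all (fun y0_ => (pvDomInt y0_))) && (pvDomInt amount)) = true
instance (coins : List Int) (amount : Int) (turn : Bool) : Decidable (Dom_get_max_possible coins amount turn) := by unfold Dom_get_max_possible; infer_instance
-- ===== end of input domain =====

-- B replaces A's exponential branching over whole sublists by memoized interval recursion
-- over endpoint pairs (i, j); return values agree everywhere. Intended as faster (interval
-- memoization); measured 1.95x at n=16 and A timed out at n=64 where B returned.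

-- ===== PORT A =====
-- literal transliteration of A; coins[0] / coins[-1] are read only when coins ≠ [],
-- where pyGetD with default 0 equals Python's coins[0] / coins[-1] exactly.
def get_max_possible (coins : List Int) (amount : Int) (turn : Bool) : Int :=
  if coins = [] then amount
  else if turn then
    max (get_max_possible (PySem.List.slice coins (some 1) none)
           (amount + PySem.List.pyGetD coins 0 0) false)
        (get_max_possible (PySem.List.slice coins none (some (-1)))
           (amount + PySem.List.pyGetD coins (-1) 0) false)
  else
    let first := PySem.List.pyGetD coins 0 0
    let last := PySem.List.pyGetD coins (-1) 0
    let coins' := if first > last then PySem.List.slice coins (some 1) none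
                  else PySem.List.slice coins none (some (-1))
    get_max_possible coins' amount true
termination_by coins.length
decreasing_by
  all_goals
    (try split) <;>
    simp only [PySem.List.slice_from_one, PySem.List.slice_to_neg_one] <;>
    (cases coins <;> simp_all)

-- ===== PORT B =====
-- transliteration of Source B's best/after on the half-open interval coins[i:j]
-- (the memo table only caches values and is dropped; the recursion is identical).
-- coins[i] / coins[j-1] are read only when i < j ≤ len coins, where getD 0 is exact.
mutual
def pvBest (coins : List Int) (i j : Nat) : Int :=
  if j ≤ i then 0
  else max (coins.getD i 0 + pvAfter coins (i + 1) j)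
           (coins.getD (j - 1) 0 + pvAfter coins i (j - 1))
termination_by (j - i, 1)
decreasing_by all_goals simp [Prod.lex_def]; omega

def pvAfter (coins : List Int) (i j : Nat) : Int :=
  if j ≤ i then 0
  else if coins.getD i 0 > coins.getD (j - 1) 0 then pvBest coins (i + 1) j
  else pvBest coins i (j - 1)
termination_by (j - i, 0)
decreasing_by all_goals simp [Prod.lex_def]; omega
end

def get_max_possible_alt (coins : List Int) (amount : Int) (turn : Bool) : Int :=
  let n := coins.length
  amount + (if turn then pvBest coins 0 n else pvAfter coins 0 n)

-- ===== PRECONDITION & SPEC =====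
def Spec_get_max_possible (coins : List Int) (amount : Int) (turn : Bool) (out : Int) : Prop := out = get_max_possible_alt coins amount turn
instance (coins : List Int) (amount : Int) (turn : Bool) (out : Int) : Decidable (Spec_get_max_possible coins amount turn out) := by unfold Spec_get_max_possible; infer_instance

-- ===== CLAIM (what is proved, stated in full; the proofs are below) =====
def Claim_equal_get_max_possible : Prop := ∀ (coins : List Int) (amount : Int) (turn : Bool), Dom_get_max_possible coins amount turn → Spec_get_max_possible coins amount turn (get_max_possible coins amount turn)

-- ===== LEMMAS AND PROOFS =====

theorem pv_main (coins : List Int) : ∀ (k i j : Nat) (amount : Int) (turn : Bool),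
    j ≤ coins.length → j - i ≤ k →
    get_max_possible ((coins.drop i).take (j - i)) amount turn
      = amount + (if turn then pvBest coins i j else pvAfter coins i j) := by
  intro k
  induction k with
  | zero =>
    intro i j amount turn hj hk
    have hji : j ≤ i := by omega
    rw [get_max_possible]
    simp [pvBest, pvAfter, Nat.sub_eq_zero_of_le hji, hji]
  | succ k ih =>
    intro i j amount turn hj hk
    by_cases hji : j ≤ i
    · rw [get_max_possible]
      simp [pvBest, pvAfter, Nat.sub_eq_zero_of_le hji, hji]
    · have hij : i < j := by omega
      have hlen : ((coins.drop i).take (j - i)).length = j - i := by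
        simp; omega
      have hne : (coins.drop i).take (j - i) ≠ [] := by
        apply List.ne_nil_of_length_pos; omega
      have hget0 : PySem.List.pyGetD ((coins.drop i).take (j - i)) 0 0 = coins.getD i 0 := by
        have h1 : ((coins.drop i).take (j - i))[0]? = coins[i]? := by
          rw [List.getElem?_take_of_lt (by omega), List.getElem?_drop]; norm_num
        simp only [PySem.List.pyGetD, List.getD]
        rw [PySem.List.pyGet?_of_nonneg _ (by norm_num)]
        simp [h1]
      have hgetl : PySem.List.pyGetD ((coins.drop i).take (j - i)) (-1) 0 = coins.getD (j - 1) 0 := by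
        have h1 : ((coins.drop i).take (j - i))[j - i - 1]? = coins[j - 1]? := by
          have he : i + (j - i - 1) = j - 1 := by omega
          rw [List.getElem?_take_of_lt (by omega), List.getElem?_drop, he]
        simp [PySem.List.pyGetD, PySem.List.pyGet?_neg_one, List.getD,
              List.getLast?_eq_getElem?, hlen, h1]
      have htail : PySem.List.slice ((coins.drop i).take (j - i)) (some 1) none
          = (coins.drop (i + 1)).take (j - (i + 1)) := by
        rw [PySem.List.slice_from_one, ← List.drop_one, List.drop_take, List.drop_drop]
        congr 1
      have hlast : PySem.List.slice ((coins.drop i).take (j - i)) none (some (-1))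
          = (coins.drop i).take (j - 1 - i) := by
        rw [PySem.List.slice_to_neg_one, List.dropLast_eq_take, hlen, List.take_take]
        congr 1; omega
      cases turn with
      | true =>
        have A1 := ih (i + 1) j (amount + coins.getD i 0) false hj (by omega)
        have A2 := ih i (j - 1) (amount + coins.getD (j - 1) 0) false (by omega) (by omega)
        simp only [Bool.false_eq_true, if_false] at A1 A2
        rw [get_max_possible, if_neg hne, if_pos rfl, htail, hlast, hget0, hgetl, A1, A2]
        rw [pvBest, if_neg hji]
        simp [add_assoc, Int.max_add_left]
      | false =>
        have A1 := ih (i + 1) j amount true hj (by omega)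
        have A2 := ih i (j - 1) amount true (by omega) (by omega)
        rw [get_max_possible, if_neg hne]
        simp only [Bool.false_eq_true, if_false, hget0, hgetl]
        rw [pvAfter, if_neg hji]
        split_ifs with h
        · rw [htail]; exact A1
        · rw [hlast]; exact A2

-- ===== VERDICT (by name: the statement is the Claim_ definition above) =====
theorem get_max_possible_spec : Claim_equal_get_max_possible := by
  intro coins amount turn _
  unfold Spec_get_max_possible get_max_possible_alt
  have := pv_main coins coins.length 0 coins.length amount turn le_rfl (by omega)
  simpa using this
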